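-- pv_equiv track=rewrite | github.com/DhaneshKolu/Navigen-Smart_Travel_Guide | backend/app/api/plan_api.py | _group_suitability_points
-- ===== SOURCE A (Python) =====
-- def _group_suitability_points(group_type: str, stop_name: str, category: str) -> int:
--     g = (group_type or "Solo").lower()
--     hay = f"{stop_name or ''} {category or ''}".lower()
--     if g == "family":
--         if any(k in hay for k in ["zoo", "park", "planetarium", "film city", "garden"]):
--             return 20
--         if any(k in hay for k in ["fort", "museum", "lake"]):
--             return 15
--         return 10
--     if g == "couple":
--         if any(k in hay for k in ["lake", "garden", "sunset", "palace", "fort", "road"]):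
--             return 20
--         return 12
--     if g == "friends":
--         if any(k in hay for k in ["bazaar", "market", "lake", "show", "beach", "fort"]):
--             return 20
--         return 12
--     if any(k in hay for k in ["museum", "fort", "market", "viewpoint", "temple", "lake"]):
--         return 18
--     return 12
-- ===== SOURCE B (Python) =====
-- # Flat keyword->points scoring: return the max points among matched keywords (default if none),
-- # replacing A's ordered tier cascade; correct because each group's tier points strictly decrease.
-- _KEYWORD_POINTS = {
--     "family": (10, [("zoo", 20), ("park", 20), ("planetarium", 20), ("film city", 20),
--                     ("garden", 20), ("fort", 15), ("museum", 15), ("lake", 15)]),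
--     "couple": (12, [("lake", 20), ("garden", 20), ("sunset", 20), ("palace", 20),
--                     ("fort", 20), ("road", 20)]),
--     "friends": (12, [("bazaar", 20), ("market", 20), ("lake", 20), ("show", 20),
--                      ("beach", 20), ("fort", 20)]),
-- }
-- _OTHER = (12, [("museum", 18), ("fort", 18), ("market", 18), ("viewpoint", 18),
--                ("temple", 18), ("lake", 18)])
--
--
-- def _group_suitability_points(group_type: str, stop_name: str, category: str) -> int:
--     g = (group_type or "Solo").lower()
--     hay = f"{stop_name or ''} {category or ''}".lower()
--     default, table = _KEYWORD_POINTS.get(g, _OTHER)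
--     return max((pts for kw, pts in table if kw in hay), default=default)
-- ===== Notes on version B (the rewrite author's own statement) =====
-- stated objective: alternative
-- what changed: Replaces the ordered tier cascade with early returns by a flat keyword-to-points map per group and a single max over the points of all matched keywords (with the group default as the empty-match value); correct because tier points strictly decrease within each group.
import Mathlib
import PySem

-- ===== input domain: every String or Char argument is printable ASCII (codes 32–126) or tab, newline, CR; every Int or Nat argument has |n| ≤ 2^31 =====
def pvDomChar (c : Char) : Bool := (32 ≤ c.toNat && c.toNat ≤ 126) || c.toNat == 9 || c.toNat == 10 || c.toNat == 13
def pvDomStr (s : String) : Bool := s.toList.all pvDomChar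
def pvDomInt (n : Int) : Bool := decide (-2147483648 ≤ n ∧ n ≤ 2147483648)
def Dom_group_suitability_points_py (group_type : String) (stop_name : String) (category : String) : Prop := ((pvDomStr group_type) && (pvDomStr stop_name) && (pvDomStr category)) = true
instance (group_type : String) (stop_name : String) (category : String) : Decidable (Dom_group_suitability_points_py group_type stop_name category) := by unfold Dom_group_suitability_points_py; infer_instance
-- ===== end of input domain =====

-- B replaces A's ordered tier cascade by a max over a flat keyword->points map (alternative decomposition, same cost).

-- ===== PORT A =====
-- literal transliteration of A's if-cascade; strings handled on the List Char side (PySem.Chars)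
def group_suitability_points_py (group_type : String) (stop_name : String) (category : String) : Int :=
  let g : List Char := PySem.Chars.lower (if group_type == "" then "Solo".toList else group_type.toList)
  let hay : List Char := PySem.Chars.lower (stop_name.toList ++ ' ' :: category.toList)
  if g = "family".toList then
    if (["zoo", "park", "planetarium", "film city", "garden"].map String.toList).any
        (fun k => PySem.Chars.isIn k hay) then 20
    else if (["fort", "museum", "lake"].map String.toList).any
        (fun k => PySem.Chars.isIn k hay) then 15
    else 10
  else if g = "couple".toList then
    if (["lake", "garden", "sunset", "palace", "fort", "road"].map String.toList).any
        (fun k => PySem.Chars.isIn k hay) then 20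
    else 12
  else if g = "friends".toList then
    if (["bazaar", "market", "lake", "show", "beach", "fort"].map String.toList).any
        (fun k => PySem.Chars.isIn k hay) then 20
    else 12
  else if (["museum", "fort", "market", "viewpoint", "temple", "lake"].map String.toList).any
        (fun k => PySem.Chars.isIn k hay) then 18
  else 12

-- ===== PORT B =====
-- the _KEYWORD_POINTS dict of Source B: group -> (default, flat list of (keyword, points))
def gsTable : PySem.Dict (List Char) (Int × List (List Char × Int)) :=
  ⟨[("family".toList, (10, [("zoo".toList, 20), ("park".toList, 20), ("planetarium".toList, 20),
                            ("film city".toList, 20), ("garden".toList, 20), ("fort".toList, 15),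
                            ("museum".toList, 15), ("lake".toList, 15)])),
    ("couple".toList, (12, [("lake".toList, 20), ("garden".toList, 20), ("sunset".toList, 20),
                            ("palace".toList, 20), ("fort".toList, 20), ("road".toList, 20)])),
    ("friends".toList, (12, [("bazaar".toList, 20), ("market".toList, 20), ("lake".toList, 20),
                             ("show".toList, 20), ("beach".toList, 20), ("fort".toList, 20)]))]⟩

-- the _OTHER entry of Source B
def gsOther : Int × List (List Char × Int) :=
  (12, [("museum".toList, 18), ("fort".toList, 18), ("market".toList, 18),
        ("viewpoint".toList, 18), ("temple".toList, 18), ("lake".toList, 18)])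

-- Source B's max(gen, default=d): maximum of the list, or d when it is empty
def gsMaxD (dflt : Int) : List Int → Int
  | [] => dflt
  | x :: xs => xs.foldl max x

def group_suitability_points_py_alt (group_type : String) (stop_name : String) (category : String) : Int :=
  let g : List Char := PySem.Chars.lower (if group_type == "" then "Solo".toList else group_type.toList)
  let hay : List Char := PySem.Chars.lower (stop_name.toList ++ ' ' :: category.toList)
  let entry := PySem.Dict.getD gsTable g gsOther
  gsMaxD entry.1 ((entry.2.filter (fun p => PySem.Chars.isIn p.1 hay)).map Prod.snd)

-- ===== PRECONDITION & SPEC =====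
def Spec_group_suitability_points_py (group_type : String) (stop_name : String) (category : String) (out : Int) : Prop := out = group_suitability_points_py_alt group_type stop_name category
instance (group_type : String) (stop_name : String) (category : String) (out : Int) : Decidable (Spec_group_suitability_points_py group_type stop_name category out) := by unfold Spec_group_suitability_points_py; infer_instance

-- ===== CLAIM (what is proved, stated in full; the proofs are below) =====
def Claim_equal_group_suitability_points_py : Prop := ∀ (group_type : String) (stop_name : String) (category : String), Dom_group_suitability_points_py group_type stop_name category → Spec_group_suitability_points_py group_type stop_name category (group_suitability_points_py group_type stop_name category)

-- ===== LEMMAS AND PROOFS =====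
theorem tl_family : "family".toList = ['f', 'a', 'm', 'i', 'l', 'y'] := by decide
theorem tl_couple : "couple".toList = ['c', 'o', 'u', 'p', 'l', 'e'] := by decide
theorem tl_friends : "friends".toList = ['f', 'r', 'i', 'e', 'n', 'd', 's'] := by decide
theorem tl_zoo : "zoo".toList = ['z', 'o', 'o'] := by decide
theorem tl_park : "park".toList = ['p', 'a', 'r', 'k'] := by decide
theorem tl_planetarium : "planetarium".toList = ['p', 'l', 'a', 'n', 'e', 't', 'a', 'r', 'i', 'u', 'm'] := by decide
theorem tl_film_city : "film city".toList = ['f', 'i', 'l', 'm', ' ', 'c', 'i', 't', 'y'] := by decide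
theorem tl_garden : "garden".toList = ['g', 'a', 'r', 'd', 'e', 'n'] := by decide
theorem tl_fort : "fort".toList = ['f', 'o', 'r', 't'] := by decide
theorem tl_museum : "museum".toList = ['m', 'u', 's', 'e', 'u', 'm'] := by decide
theorem tl_lake : "lake".toList = ['l', 'a', 'k', 'e'] := by decide
theorem tl_sunset : "sunset".toList = ['s', 'u', 'n', 's', 'e', 't'] := by decide
theorem tl_palace : "palace".toList = ['p', 'a', 'l', 'a', 'c', 'e'] := by decide
theorem tl_road : "road".toList = ['r', 'o', 'a', 'd'] := by decide
theorem tl_bazaar : "bazaar".toList = ['b', 'a', 'z', 'a', 'a', 'r'] := by decide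
theorem tl_market : "market".toList = ['m', 'a', 'r', 'k', 'e', 't'] := by decide
theorem tl_show : "show".toList = ['s', 'h', 'o', 'w'] := by decide
theorem tl_beach : "beach".toList = ['b', 'e', 'a', 'c', 'h'] := by decide
theorem tl_viewpoint : "viewpoint".toList = ['v', 'i', 'e', 'w', 'p', 'o', 'i', 'n', 't'] := by decide
theorem tl_temple : "temple".toList = ['t', 'e', 'm', 'p', 'l', 'e'] := by decide

-- ===== VERDICT (by name: the statement is the Claim_ definition above) =====
theorem group_suitability_points_py_spec : Claim_equal_group_suitability_points_py := by
  intro gt sn cat _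
  unfold Spec_group_suitability_points_py group_suitability_points_py group_suitability_points_py_alt
  generalize PySem.Chars.lower (if gt == "" then "Solo".toList else gt.toList) = g
  generalize PySem.Chars.lower (sn.toList ++ ' ' :: cat.toList) = hay
  simp only [tl_family, tl_couple, tl_friends]
  by_cases h1 : g = ['f', 'a', 'm', 'i', 'l', 'y']
  · subst h1
    simp only [gsTable, gsOther, PySem.Dict.getD, PySem.Dict.get?, List.find?, Option.map,
                 Option.getD, tl_family, tl_couple, tl_friends, tl_zoo, tl_park, tl_planetarium, tl_film_city, tl_garden, tl_fort, tl_museum, tl_lake, tl_sunset, tl_palace, tl_road, tl_bazaar, tl_market, tl_show, tl_beach, tl_viewpoint, tl_temple,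
                 List.map_cons, List.map_nil, List.any_cons, List.any_nil]
    simp
    simp only [List.filter_cons, List.filter_nil]
    generalize PySem.Chars.isIn ['z', 'o', 'o'] hay = b1
    generalize PySem.Chars.isIn ['p', 'a', 'r', 'k'] hay = b2
    generalize PySem.Chars.isIn ['p', 'l', 'a', 'n', 'e', 't', 'a', 'r', 'i', 'u', 'm'] hay = b3
    generalize PySem.Chars.isIn ['f', 'i', 'l', 'm', ' ', 'c', 'i', 't', 'y'] hay = b4
    generalize PySem.Chars.isIn ['g', 'a', 'r', 'd', 'e', 'n'] hay = b5
    generalize PySem.Chars.isIn ['f', 'o', 'r', 't'] hay = b6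
    generalize PySem.Chars.isIn ['m', 'u', 's', 'e', 'u', 'm'] hay = b7
    generalize PySem.Chars.isIn ['l', 'a', 'k', 'e'] hay = b8
    revert b1 b2 b3 b4 b5 b6 b7 b8
    decide
  · by_cases h2 : g = ['c', 'o', 'u', 'p', 'l', 'e']
    · subst h2
      have e1 : (['f', 'a', 'm', 'i', 'l', 'y'] == ['c', 'o', 'u', 'p', 'l', 'e']) = false := by decide
      simp only [gsTable, gsOther, PySem.Dict.getD, PySem.Dict.get?, List.find?, Option.map,
                   Option.getD, tl_family, tl_couple, tl_friends, tl_zoo, tl_park, tl_planetarium, tl_film_city, tl_garden, tl_fort, tl_museum, tl_lake, tl_sunset, tl_palace, tl_road, tl_bazaar, tl_market, tl_show, tl_beach, tl_viewpoint, tl_temple,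
                   List.map_cons, List.map_nil, List.any_cons, List.any_nil]
      simp only [e1, beq_self_eq_true, if_neg h1, if_true]
      simp
      simp only [List.filter_cons, List.filter_nil]
      generalize PySem.Chars.isIn ['l', 'a', 'k', 'e'] hay = b1
      generalize PySem.Chars.isIn ['g', 'a', 'r', 'd', 'e', 'n'] hay = b2
      generalize PySem.Chars.isIn ['s', 'u', 'n', 's', 'e', 't'] hay = b3
      generalize PySem.Chars.isIn ['p', 'a', 'l', 'a', 'c', 'e'] hay = b4
      generalize PySem.Chars.isIn ['f', 'o', 'r', 't'] hay = b5
      generalize PySem.Chars.isIn ['r', 'o', 'a', 'd'] hay = b6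
      revert b1 b2 b3 b4 b5 b6
      decide
    · by_cases h3 : g = ['f', 'r', 'i', 'e', 'n', 'd', 's']
      · subst h3
        have e1 : (['f', 'a', 'm', 'i', 'l', 'y'] == ['f', 'r', 'i', 'e', 'n', 'd', 's']) = false := by decide
        have e2 : (['c', 'o', 'u', 'p', 'l', 'e'] == ['f', 'r', 'i', 'e', 'n', 'd', 's']) = false := by decide
        simp only [gsTable, gsOther, PySem.Dict.getD, PySem.Dict.get?, List.find?, Option.map,
                     Option.getD, tl_family, tl_couple, tl_friends, tl_zoo, tl_park, tl_planetarium, tl_film_city, tl_garden, tl_fort, tl_museum, tl_lake, tl_sunset, tl_palace, tl_road, tl_bazaar, tl_market, tl_show, tl_beach, tl_viewpoint, tl_temple,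
                     List.map_cons, List.map_nil, List.any_cons, List.any_nil]
        simp only [e1, e2, beq_self_eq_true, if_neg h1, if_neg h2, if_true]
        simp
        simp only [List.filter_cons, List.filter_nil]
        generalize PySem.Chars.isIn ['b', 'a', 'z', 'a', 'a', 'r'] hay = b1
        generalize PySem.Chars.isIn ['m', 'a', 'r', 'k', 'e', 't'] hay = b2
        generalize PySem.Chars.isIn ['l', 'a', 'k', 'e'] hay = b3
        generalize PySem.Chars.isIn ['s', 'h', 'o', 'w'] hay = b4
        generalize PySem.Chars.isIn ['b', 'e', 'a', 'c', 'h'] hay = b5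
        generalize PySem.Chars.isIn ['f', 'o', 'r', 't'] hay = b6
        revert b1 b2 b3 b4 b5 b6
        decide
      · have e1 : (['f', 'a', 'm', 'i', 'l', 'y'] == g) = false := by
          simp only [beq_eq_false_iff_ne, ne_eq]; exact fun h => h1 h.symm
        have e2 : (['c', 'o', 'u', 'p', 'l', 'e'] == g) = false := by
          simp only [beq_eq_false_iff_ne, ne_eq]; exact fun h => h2 h.symm
        have e3 : (['f', 'r', 'i', 'e', 'n', 'd', 's'] == g) = false := by
          simp only [beq_eq_false_iff_ne, ne_eq]; exact fun h => h3 h.symm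
        simp only [gsTable, gsOther, PySem.Dict.getD, PySem.Dict.get?, List.find?, Option.map,
                     Option.getD, tl_family, tl_couple, tl_friends, tl_zoo, tl_park, tl_planetarium, tl_film_city, tl_garden, tl_fort, tl_museum, tl_lake, tl_sunset, tl_palace, tl_road, tl_bazaar, tl_market, tl_show, tl_beach, tl_viewpoint, tl_temple,
                     List.map_cons, List.map_nil, List.any_cons, List.any_nil]
        simp only [e1, e2, e3, if_neg h1, if_neg h2, if_neg h3]
        simp
        simp only [List.filter_cons, List.filter_nil]
        generalize PySem.Chars.isIn ['m', 'u', 's', 'e', 'u', 'm'] hay = b1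
        generalize PySem.Chars.isIn ['f', 'o', 'r', 't'] hay = b2
        generalize PySem.Chars.isIn ['m', 'a', 'r', 'k', 'e', 't'] hay = b3
        generalize PySem.Chars.isIn ['v', 'i', 'e', 'w', 'p', 'o', 'i', 'n', 't'] hay = b4
        generalize PySem.Chars.isIn ['t', 'e', 'm', 'p', 'l', 'e'] hay = b5
        generalize PySem.Chars.isIn ['l', 'a', 'k', 'e'] hay = b6
        revert b1 b2 b3 b4 b5 b6
        decide
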